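-- pv_equiv track=rewrite | github.com/Stonewater-Digital/snowdrop-mcp | skills/network/agent_network_mapper.py | _dfs_without
-- ===== SOURCE A (Python) =====
-- def _dfs_without(graph: dict[str, set[str]], start: str, excluded: str) -> set[str]:
--     stack = [start]
--     visited: set[str] = set()
--     while stack:
--         node = stack.pop()
--         if node in visited or node == excluded:
--             continue
--         visited.add(node)
--         for neighbor in graph.get(node, set()):
--             if neighbor not in visited and neighbor != excluded:
--                 stack.append(neighbor)
--     return visited
-- ===== SOURCE B (Python) =====
-- def _dfs_without(graph: dict[str, set[str]], start: str, excluded: str) -> set[str]: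
--     # Recursive DFS: one uniform base case (visited/excluded) replaces the
--     # stack bookkeeping and the per-neighbor push guards of the original.
--     # Neighbors are taken in reverse sequence order so that, when the neighbor
--     # collections are ordered, nodes are discovered in the same order as the
--     # stack version (on sets the order is immaterial).
--     visited: set[str] = set()
--
--     def visit(node: str) -> None:
--         if node in visited or node == excluded:
--             return
--         visited.add(node)
--         for neighbor in reversed(list(graph.get(node, set()))):
--             visit(neighbor)
--
--     visit(start)
--     return visited
-- ===== Notes on version B (the rewrite author's own statement) =====
-- stated objective: simpler
-- what changed: Replaces the explicit-stack while loop (pop, membership/exclusion guard, filtered pushes) by a recursive DFS helper with a single uniform base case; the per-neighbor push guards disappear.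
import Mathlib
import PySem

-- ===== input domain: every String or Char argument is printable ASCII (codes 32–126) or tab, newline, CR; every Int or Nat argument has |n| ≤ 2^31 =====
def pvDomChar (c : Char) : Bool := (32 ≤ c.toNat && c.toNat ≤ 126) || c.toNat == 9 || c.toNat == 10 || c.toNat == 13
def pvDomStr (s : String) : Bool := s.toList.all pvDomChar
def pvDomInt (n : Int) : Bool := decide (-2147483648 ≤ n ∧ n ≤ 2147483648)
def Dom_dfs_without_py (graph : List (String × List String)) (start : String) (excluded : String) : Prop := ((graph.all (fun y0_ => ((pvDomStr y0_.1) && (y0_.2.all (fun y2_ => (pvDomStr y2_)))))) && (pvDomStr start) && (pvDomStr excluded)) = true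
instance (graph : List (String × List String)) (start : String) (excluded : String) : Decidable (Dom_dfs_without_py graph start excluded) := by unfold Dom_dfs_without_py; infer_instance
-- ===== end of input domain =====

-- B is a recursive DFS with one uniform base case replacing A's explicit stack and
-- per-neighbor push guards (objective: simpler); the return value is a Python set.

-- ===== PORT A =====
-- graph.get(node, set()) — first-match lookup in the association list
def pvNbrs (graph : List (String × List String)) (node : String) : List String :=
  PySem.Dict.getD (PySem.Dict.mk graph) node []

-- termination measure helper for A's while loop (not part of the algorithm):
-- neighbor lists of the not-yet-visited keys
def pvPot (graph : List (String × List String)) (visited : PySem.Set String) : Nat :=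
  ((graph.map Prod.fst).map
    (fun k => if PySem.Set.contains visited k then 0 else (pvNbrs graph k).length)).sum

theorem pvSumMono (f f' : String → Nat) (h : ∀ k, f' k ≤ f k) :
    ∀ l : List String, (l.map f').sum ≤ (l.map f).sum := by
  intro l
  induction l with
  | nil => simp
  | cons a l ih => simp only [List.map_cons, List.sum_cons]; exact Nat.add_le_add (h a) ih

theorem pvSumDrop (f f' : String → Nat) (x : String) (hx : f' x = 0)
    (h : ∀ k, f' k ≤ f k) :
    ∀ l : List String, x ∈ l → (l.map f').sum + f x ≤ (l.map f).sum := by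
  intro l hl
  induction l with
  | nil => simp at hl
  | cons a l ih =>
    simp only [List.map_cons, List.sum_cons]
    by_cases hax : a = x
    · subst hax
      have := pvSumMono f f' h l
      omega
    · have hxl : x ∈ l := by
        rcases List.mem_cons.mp hl with h1 | h1
        · exact absurd h1.symm hax
        · exact h1
      have := ih hxl
      have := h a
      omega

theorem pvNotMem {v : PySem.Set String} {x : String}
    (h : PySem.Set.contains v x = false) : x ∉ v := by
  intro hm
  rw [(PySem.Set.contains_iff v x).mpr hm] at h
  cases h

theorem pvMemAdd {v : PySem.Set String} {x : String} (n : String) (h : x ∈ v) :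
    x ∈ PySem.Set.add v n := (PySem.Set.mem_add v n x).mpr (Or.inl h)

theorem pvMemAddSelf (v : PySem.Set String) (n : String) :
    n ∈ PySem.Set.add v n := (PySem.Set.mem_add v n n).mpr (Or.inr rfl)

theorem pvNbrs_not_key (graph : List (String × List String)) (node : String)
    (h : node ∉ graph.map Prod.fst) : pvNbrs graph node = [] := by
  cases hc : PySem.Dict.contains (PySem.Dict.mk graph) node with
  | false => simpa [pvNbrs] using PySem.Dict.getD_of_not_contains _ ([] : List String) hc
  | true =>
    exact absurd (by
      simpa [PySem.Dict.keys_mk] using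
        (PySem.Dict.contains_iff_mem_keys (PySem.Dict.mk graph) node).mp hc) h

theorem pvPot_mono (graph : List (String × List String)) (v w : PySem.Set String)
    (h : ∀ x, x ∈ v → x ∈ w) : pvPot graph w ≤ pvPot graph v := by
  apply pvSumMono
  intro k
  by_cases hv : k ∈ v
  · simp [hv, h k hv]
  · by_cases hw : k ∈ w <;> simp [hv, hw]

theorem pvPot_drop (graph : List (String × List String)) (v : PySem.Set String)
    (n : String) (hv : n ∉ v) (hk : n ∈ graph.map Prod.fst) :
    pvPot graph (PySem.Set.add v n) + (pvNbrs graph n).length ≤ pvPot graph v := by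
  have hx : (if PySem.Set.contains (PySem.Set.add v n) n then 0 else (pvNbrs graph n).length) = 0 := by
    simp [pvMemAddSelf v n]
  have hmono : ∀ k, (if PySem.Set.contains (PySem.Set.add v n) k then 0 else (pvNbrs graph k).length)
      ≤ (if PySem.Set.contains v k then 0 else (pvNbrs graph k).length) := by
    intro k
    by_cases hvk : k ∈ v
    · simp [hvk, pvMemAdd n hvk]
    · by_cases hwk : k ∈ PySem.Set.add v n <;> simp [hvk, hwk]
  have := pvSumDrop _ _ n hx hmono (graph.map Prod.fst) hk
  simpa [pvPot, hv] using this

-- literal transliteration of A's while loop (stack top = list head; Python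
-- pushes n1..nk and pops nk first, i.e. the filtered neighbors are prepended reversed)
def dfsLoop (graph : List (String × List String)) (excluded : String)
    (stack : List String) (visited : PySem.Set String) : List String :=
  match stack with
  | [] => visited
  | node :: rest =>
    if PySem.Set.contains visited node || node == excluded then
      dfsLoop graph excluded rest visited
    else
      dfsLoop graph excluded
        (((pvNbrs graph node).filter
            (fun nb => !(PySem.Set.contains (PySem.Set.add visited node) nb) && !(nb == excluded))).reverse ++ rest)
        (PySem.Set.add visited node)
termination_by stack.length + pvPot graph visited
decreasing_by
  · simp only [List.length_cons]; omega
  · rename_i h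
    simp only [Bool.or_eq_true, not_or, Bool.not_eq_true] at h
    have hnv : node ∉ visited := pvNotMem h.1
    have hlen : ((pvNbrs graph node).filter
        (fun nb => !(PySem.Set.contains (PySem.Set.add visited node) nb) && !(nb == excluded))).length
        ≤ (pvNbrs graph node).length := List.length_filter_le _ _
    by_cases hk : node ∈ graph.map Prod.fst
    · have hdrop := pvPot_drop graph visited node hnv hk
      simp only [List.length_append, List.length_reverse, List.length_cons]
      omega
    · have h0 : pvNbrs graph node = [] := pvNbrs_not_key graph node hk
      simp only [h0, List.filter_nil, List.reverse_nil, List.nil_append, List.length_cons]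
      have := pvPot_mono graph visited (PySem.Set.add visited node)
        (fun x hx => pvMemAdd node hx)
      omega

def dfs_without_py (graph : List (String × List String)) (start : String) (excluded : String) : List String :=
  dfsLoop graph excluded [start] PySem.Set.empty

-- ===== PORT B =====
-- fuel: a bound on the recursion depth (distinct visitable nodes + 1);
-- purely a totality crutch, the Python recursion carries no counter
def pvFuel (graph : List (String × List String)) (start : String) : Nat :=
  (start :: graph.flatMap (fun p => p.1 :: p.2)).length + 1

-- literal transliteration of B's recursive helper `visit` (visited threaded as the
-- accumulator; `for neighbor in reversed(...)` = foldl over the reversed neighbor list)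
def visitB (graph : List (String × List String)) (excluded : String) :
    Nat → String → PySem.Set String → PySem.Set String
  | 0, _, visited => visited
  | Nat.succ f, node, visited =>
    if PySem.Set.contains visited node || node == excluded then visited
    else
      ((pvNbrs graph node).reverse).foldl
        (fun acc nb => visitB graph excluded f nb acc)
        (PySem.Set.add visited node)

def dfs_without_py_alt (graph : List (String × List String)) (start : String) (excluded : String) : List String :=
  visitB graph excluded (pvFuel graph start) start PySem.Set.empty

-- ===== PRECONDITION & SPEC =====
def Spec_dfs_without_py (graph : List (String × List String)) (start : String) (excluded : String) (out : List String) : Prop := out = dfs_without_py_alt graph start excluded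
instance (graph : List (String × List String)) (start : String) (excluded : String) (out : List String) : Decidable (Spec_dfs_without_py graph start excluded out) := by unfold Spec_dfs_without_py; infer_instance

-- ===== CLAIM (what is proved, stated in full; the proofs are below) =====
def Claim_equal_dfs_without_py : Prop := ∀ (graph : List (String × List String)) (start : String) (excluded : String), Dom_dfs_without_py graph start excluded → Spec_dfs_without_py graph start excluded (dfs_without_py graph start excluded)

-- ===== LEMMAS AND PROOFS =====

theorem pvMemC {v : PySem.Set String} {x : String} (h : x ∈ v) :
    PySem.Set.contains v x = true := (PySem.Set.contains_iff v x).mpr h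

-- every node the search can ever stand on: start, the keys, and all neighbors
def pvUniv (graph : List (String × List String)) (start : String) : List String :=
  start :: graph.flatMap (fun p => p.1 :: p.2)

theorem pvFuel_eq (graph : List (String × List String)) (start : String) :
    pvFuel graph start = (pvUniv graph start).length + 1 := rfl

-- univ nodes not yet visited (strictly decreases whenever a univ node is added)
def pvM (graph : List (String × List String)) (start : String) (v : PySem.Set String) : Nat :=
  ((pvUniv graph start).filter (fun k => !(PySem.Set.contains v k))).length

theorem pvMemNbrsUniv (graph : List (String × List String)) (start node x : String)
    (hx : x ∈ pvNbrs graph node) : x ∈ pvUniv graph start := by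
  have : x ∈ graph.flatMap (fun p => p.1 :: p.2) := by
    induction graph with
    | nil =>
      rw [pvNbrs, PySem.Dict.getD_eq_get?_getD] at hx
      rw [show ({ items := [] } : PySem.Dict String (List String)) = PySem.Dict.empty from rfl,
        PySem.Dict.get?_empty ..] at hx
      simp at hx
    | cons e g ih =>
      obtain ⟨k, ns⟩ := e
      rw [pvNbrs, PySem.Dict.getD_eq_get?_getD, PySem.Dict.get?_mk_cons] at hx
      by_cases hk : (k == node) = true
      · simp only [hk, if_pos, Option.getD_some] at hx
        simp only [List.flatMap_cons, List.mem_append, List.mem_cons]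
        exact Or.inl (Or.inr hx)
      · have hkf : (k == node) = false := by simpa using hk
        simp only [hkf, Bool.false_eq_true, if_false] at hx
        rw [← PySem.Dict.getD_eq_get?_getD] at hx
        simp only [List.flatMap_cons, List.mem_append]
        exact Or.inr (ih hx)
  simp only [pvUniv, List.mem_cons]
  exact Or.inr this

theorem pvFilterMono (p q : String → Bool) (h : ∀ a, q a = true → p a = true) :
    ∀ l : List String, (l.filter q).length ≤ (l.filter p).length := by
  intro l
  induction l with
  | nil => simp
  | cons a l ih =>
    by_cases hq : q a = true
    · simp [hq, h a hq]; omega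
    · simp only [Bool.not_eq_true] at hq
      by_cases hp : p a = true <;> simp [hq, hp] <;> omega

theorem pvFilterDrop (p q : String → Bool) (x : String) (hp : p x = true) (hq : q x = false)
    (h : ∀ a, q a = true → p a = true) :
    ∀ l : List String, x ∈ l → (l.filter q).length < (l.filter p).length := by
  intro l hl
  induction l with
  | nil => simp at hl
  | cons a l ih =>
    by_cases hax : a = x
    · subst hax
      simp only [List.filter_cons, hq, hp, if_pos, Bool.false_eq_true, if_false,
        List.length_cons]
      have := pvFilterMono p q h l
      omega
    · have hxl : x ∈ l := by
        rcases List.mem_cons.mp hl with h1 | h1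
        · exact absurd h1.symm hax
        · exact h1
      have := ih hxl
      by_cases hqa : q a = true
      · simp [hqa, h a hqa]; omega
      · simp only [Bool.not_eq_true] at hqa
        by_cases hpa : p a = true <;> simp [hqa, hpa] <;> omega

theorem pvM_mono (graph : List (String × List String)) (start : String)
    (v w : PySem.Set String) (h : ∀ x, x ∈ v → x ∈ w) :
    pvM graph start w ≤ pvM graph start v := by
  apply pvFilterMono
  intro a ha
  simp only [Bool.not_eq_true'] at ha ⊢
  cases hv : PySem.Set.contains v a with
  | false => rfl
  | true =>
    have hw : PySem.Set.contains w a = true := pvMemC (h a ((PySem.Set.contains_iff v a).mp hv))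
    rw [hw] at ha
    cases ha

theorem pvM_drop (graph : List (String × List String)) (start : String)
    (v : PySem.Set String) (n : String) (hn : n ∈ pvUniv graph start) (hv : n ∉ v) :
    pvM graph start (PySem.Set.add v n) < pvM graph start v := by
  apply pvFilterDrop _ _ n
  · simp only [Bool.not_eq_true']
    cases hc : PySem.Set.contains v n with
    | false => rfl
    | true => exact absurd ((PySem.Set.contains_iff v n).mp hc) hv
  · simp [pvMemAddSelf v n]
  · intro a ha
    simp only [Bool.not_eq_true'] at ha ⊢
    cases hc : PySem.Set.contains v a with
    | false => rfl
    | true =>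
      rw [pvMemC (pvMemAdd n ((PySem.Set.contains_iff v a).mp hc))] at ha
      cases ha
  · exact hn

theorem pvM_le (graph : List (String × List String)) (start : String) (v : PySem.Set String) :
    pvM graph start v ≤ (pvUniv graph start).length :=
  List.length_filter_le _ _

-- visited only grows through visit
theorem pvVisitGrow (graph : List (String × List String)) (excluded : String) :
    ∀ (f : Nat) (n : String) (v : PySem.Set String) (x : String),
      x ∈ v → x ∈ visitB graph excluded f n v := by
  intro f
  induction f with
  | zero => intro n v x h; simpa [visitB] using h
  | succ f ih =>
    intro n v x h
    rw [visitB]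
    cases hskip : (PySem.Set.contains v n || n == excluded) with
    | true => simpa [hskip] using h
    | false =>
      simp only [hskip, Bool.false_eq_true, if_false]
      have hfold : ∀ (l : List String) (acc : PySem.Set String), x ∈ acc →
          x ∈ l.foldl (fun a nb => visitB graph excluded f nb a) acc := by
        intro l
        induction l with
        | nil => intro acc hacc; simpa using hacc
        | cons b l ihl => intro acc hacc; exact ihl _ (ih b acc x hacc)
      exact hfold _ _ (pvMemAdd n h)

theorem pvVisitSkip (graph : List (String × List String)) (excluded : String)
    (f : Nat) (n : String) (v : PySem.Set String)
    (h : (PySem.Set.contains v n || n == excluded) = true) :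
    visitB graph excluded f n v = v := by
  cases f with
  | zero => rfl
  | succ f =>
    rw [visitB]
    split
    · rfl
    · rename_i hc; exact absurd h hc

-- fuel stability: above pvM v the fuel value is irrelevant
theorem pvVisitStab (graph : List (String × List String)) (start excluded : String) :
    ∀ (f : Nat) (n : String) (v : PySem.Set String),
      n ∈ pvUniv graph start → pvM graph start v < f →
      visitB graph excluded f n v = visitB graph excluded (f + 1) n v := by
  intro f
  induction f using Nat.strong_induction_on with
  | _ f ih =>
    intro n v hn hf
    cases f with
    | zero => omega
    | succ f =>
      rw [visitB, visitB]
      cases hskip : (PySem.Set.contains v n || n == excluded) with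
      | true => simp
      | false =>
        simp only [Bool.false_eq_true, if_false]
        have hor := Bool.or_eq_false_iff.mp hskip
        have hnv : n ∉ v := pvNotMem hor.1
        have hvn' : pvM graph start (PySem.Set.add v n) < f := by
          have := pvM_drop graph start v n hn hnv
          omega
        have hfold : ∀ (l : List String) (acc : PySem.Set String),
            (∀ x ∈ l, x ∈ pvUniv graph start) →
            pvM graph start acc < f →
            l.foldl (fun a nb => visitB graph excluded f nb a) acc
              = l.foldl (fun a nb => visitB graph excluded (f + 1) nb a) acc := by
          intro l
          induction l with
          | nil => intro acc _ _; rfl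
          | cons b l ihl =>
            intro acc hmem hacc
            simp only [List.foldl_cons]
            rw [← ih f (by omega) b acc (hmem b (by simp)) hacc]
            apply ihl
            · intro x hx; exact hmem x (by simp [hx])
            · have := pvM_mono graph start acc (visitB graph excluded f b acc)
                (fun x hx => pvVisitGrow graph excluded f b acc x hx)
              omega
        apply hfold
        · intro x hx
          rw [List.mem_reverse] at hx
          exact pvMemNbrsUniv graph start n x hx
        · exact hvn'

theorem pvVisitGe (graph : List (String × List String)) (start excluded : String)
    (f f' : Nat) (h : f ≤ f') (n : String) (v : PySem.Set String)
    (hn : n ∈ pvUniv graph start) (hf : pvM graph start v < f) :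
    visitB graph excluded f n v = visitB graph excluded f' n v := by
  induction f' with
  | zero => omega
  | succ f' ihf =>
    by_cases hff : f = f' + 1
    · rw [hff]
    · have h1 : f ≤ f' := by omega
      rw [ihf h1]
      exact pvVisitStab graph start excluded f' n v hn (by omega)

-- A's at-push filter can be dropped: a neighbor filtered out is skipped by
-- B's base case anyway, since visited only grows
theorem pvFoldFilter (graph : List (String × List String)) (start excluded : String)
    (v' : PySem.Set String) (hv' : pvM graph start v' < (pvUniv graph start).length) :
    ∀ (l : List String) (acc : PySem.Set String),
      (∀ x ∈ l, x ∈ pvUniv graph start) →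
      (∀ x, x ∈ v' → x ∈ acc) →
      l.foldl (fun a nb => visitB graph excluded (pvUniv graph start).length nb a) acc
        = (l.filter (fun nb => !(PySem.Set.contains v' nb) && !(nb == excluded))).foldl
            (fun a nb => visitB graph excluded ((pvUniv graph start).length + 1) nb a) acc := by
  intro l
  induction l with
  | nil => intro acc _ _; rfl
  | cons y l ihl =>
    intro acc hmem hsub
    cases hcv : PySem.Set.contains v' y with
    | false =>
      cases hcy : (y == excluded) with
      | false =>
        simp only [List.filter_cons, hcv, hcy, Bool.not_false, Bool.and_self, if_pos,
          List.foldl_cons]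
        have hacc : pvM graph start acc < (pvUniv graph start).length := by
          have := pvM_mono graph start v' acc hsub
          omega
        rw [← pvVisitGe graph start excluded ((pvUniv graph start).length)
          ((pvUniv graph start).length + 1) (Nat.le_succ _) y acc (hmem y (by simp)) hacc]
        apply ihl
        · intro x hx; exact hmem x (by simp [hx])
        · intro x hx
          exact pvVisitGrow graph excluded _ y acc x (hsub x hx)
      | true =>
        simp only [List.filter_cons, hcv, hcy, Bool.not_true, Bool.and_false, Bool.false_eq_true,
          if_false, List.foldl_cons]
        rw [pvVisitSkip graph excluded ((pvUniv graph start).length) y acc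
            (by rw [hcy, Bool.or_true])]
        exact ihl acc (fun x hx => hmem x (by simp [hx])) hsub
    | true =>
      simp only [List.filter_cons, hcv, Bool.not_true, Bool.false_and, Bool.false_eq_true,
        if_false, List.foldl_cons]
      have hy : y ∈ acc := hsub y ((PySem.Set.contains_iff v' y).mp hcv)
      rw [pvVisitSkip graph excluded ((pvUniv graph start).length) y acc
          (by rw [pvMemC hy, Bool.true_or])]
      exact ihl acc (fun x hx => hmem x (by simp [hx])) hsub

-- the main simulation: A's loop over its stack = folding B's visit over the stack
theorem pvMain (graph : List (String × List String)) (start excluded : String) :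
    ∀ (stack : List String) (visited : PySem.Set String),
      (∀ x ∈ stack, x ∈ pvUniv graph start) →
      dfsLoop graph excluded stack visited
        = stack.foldl (fun acc n => visitB graph excluded (pvFuel graph start) n acc) visited := by
  intro stack visited
  induction stack, visited using dfsLoop.induct graph excluded with
  | case1 visited => intro _; rw [dfsLoop]; rfl
  | case2 visited node rest hskip ih =>
    intro hstack
    rw [dfsLoop]
    simp only [hskip, if_pos, List.foldl_cons]
    rw [pvVisitSkip graph excluded _ node visited hskip]
    exact ih (fun x hx => hstack x (by simp [hx]))
  | case3 visited node rest hskip ih =>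
    intro hstack
    rw [dfsLoop]
    have hskip' : (PySem.Set.contains visited node || node == excluded) = false := by
      cases h : (PySem.Set.contains visited node || node == excluded) with
      | false => rfl
      | true => exact absurd h hskip
    simp only [hskip', Bool.false_eq_true, if_false, List.foldl_cons]
    have hnode : node ∈ pvUniv graph start := hstack node (by simp)
    have hor := Bool.or_eq_false_iff.mp hskip'
    have hnv : node ∉ visited := pvNotMem hor.1
    have hpush : ∀ x ∈ ((pvNbrs graph node).filter
        (fun nb => !(PySem.Set.contains (PySem.Set.add visited node) nb) && !(nb == excluded))).reverse ++ rest,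
        x ∈ pvUniv graph start := by
      intro x hx
      rcases List.mem_append.mp hx with h1 | h1
      · rw [List.mem_reverse] at h1
        exact pvMemNbrsUniv graph start node x (List.mem_of_mem_filter h1)
      · exact hstack x (by simp [h1])
    rw [ih hpush, List.foldl_append]
    congr 1
    rw [pvFuel_eq, visitB]
    simp only [hskip', Bool.false_eq_true, if_false]
    have hv' : pvM graph start (PySem.Set.add visited node) < (pvUniv graph start).length := by
      have h1 := pvM_drop graph start visited node hnode hnv
      have h2 := pvM_le graph start visited
      omega
    rw [pvFoldFilter graph start excluded (PySem.Set.add visited node) hv'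
        ((pvNbrs graph node).reverse)
        (PySem.Set.add visited node)
        (fun x hx => pvMemNbrsUniv graph start node x (List.mem_reverse.mp hx))
        (fun x hx => hx)]
    rw [← List.filter_reverse]

-- ===== VERDICT (by name: the statement is the Claim_ definition above) =====
theorem dfs_without_py_spec : Claim_equal_dfs_without_py := by
  intro graph start excluded _
  unfold Spec_dfs_without_py dfs_without_py dfs_without_py_alt
  rw [pvMain graph start excluded [start] PySem.Set.empty
      (by intro x hx; simp at hx; simp [hx, pvUniv])]
  simp
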